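-- pv_equiv track=rewrite | github.com/abhi10010/Python-Scripts | SolveSudoku.py | check_num
-- ===== SOURCE A (Python) =====
-- def check_num(board, num, pos):         # Check if the number is in the valid position or not
--
--   for i in range(len(board[0])):
--     if board[pos[0]][i] == num and i != pos[1]:
--       return False
--
--   for i in range(len(board)):
--     if board[i][pos[1]] == num and i != pos[0]:
--       return False
--
--   box_r = pos[0] // 3
--   box_c = pos[1] // 3
--
--   for i in range(box_r * 3, box_r * 3 + 3):
--
--     for j in range(box_c * 3, box_c * 3 + 3):
--       if board[i][j] == num and (i, j) != pos:
--         return False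
--
--   return True
-- ===== SOURCE B (Python) =====
-- def check_num(board, num, pos):
--     # Build the peer-coordinate set (row, column, 3x3 box), drop pos itself,
--     # then do one unified scan instead of three early-return loops.
--     br = pos[0] // 3 * 3
--     bc = pos[1] // 3 * 3
--     peers = {(pos[0], c) for c in range(len(board[0]))}
--     peers |= {(r, pos[1]) for r in range(len(board))}
--     peers |= {(r, c) for r in range(br, br + 3) for c in range(bc, bc + 3)}
--     peers.discard(pos)
--     return all(board[r][c] != num for r, c in peers)
-- ===== Notes on version B (the rewrite author's own statement) =====
-- stated objective: alternative
-- what changed: B builds the peer-coordinate set (whole row, whole column, 3x3 box) once, removes pos, and does one unified all() scan instead of A's three separate early-return loops.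
-- outside the precondition, e.g. on check_num([[0]], 0, (0, 4)): A returns False, B raises IndexError
import Mathlib
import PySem

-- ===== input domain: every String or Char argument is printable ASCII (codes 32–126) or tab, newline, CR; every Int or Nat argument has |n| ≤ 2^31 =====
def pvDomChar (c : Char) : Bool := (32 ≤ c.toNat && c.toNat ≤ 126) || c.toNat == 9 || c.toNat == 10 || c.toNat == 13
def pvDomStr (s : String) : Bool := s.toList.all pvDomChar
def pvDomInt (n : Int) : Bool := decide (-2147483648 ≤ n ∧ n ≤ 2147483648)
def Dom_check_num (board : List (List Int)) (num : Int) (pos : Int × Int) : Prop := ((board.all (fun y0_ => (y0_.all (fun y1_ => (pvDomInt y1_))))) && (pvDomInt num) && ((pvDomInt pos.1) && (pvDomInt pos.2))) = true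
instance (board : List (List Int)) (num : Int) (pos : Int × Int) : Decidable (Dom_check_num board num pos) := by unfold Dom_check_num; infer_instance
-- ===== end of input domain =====

-- B replaces A's three early-return scans by one unified check over the peer-coordinate
-- set (row ∪ column ∪ 3×3 box minus pos); objective: alternative decomposition, same cost.

-- ===== PORT A =====
-- board[r][c]; the defaults are never reached inside Pre_check_num (Python raises there)
def pvCell (board : List (List Int)) (r c : Int) : Int :=
  PySem.List.pyGetD (PySem.List.pyGetD board r []) c 0

def check_num (board : List (List Int)) (num : Int) (pos : Int × Int) : Bool :=
  -- for i in range(len(board[0])): if board[pos[0]][i] == num and i != pos[1]: return False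
  if (PySem.List.pyRange 0 (PySem.List.pyGetD board 0 []).length 1).any
       (fun i => pvCell board pos.1 i == num && i != pos.2) then false
  -- for i in range(len(board)): if board[i][pos[1]] == num and i != pos[0]: return False
  else if (PySem.List.pyRange 0 board.length 1).any
       (fun i => pvCell board i pos.2 == num && i != pos.1) then false
  else
    let box_r := PySem.Int.floordiv pos.1 3
    let box_c := PySem.Int.floordiv pos.2 3
    if (PySem.List.pyRange (box_r * 3) (box_r * 3 + 3) 1).any (fun i =>
         (PySem.List.pyRange (box_c * 3) (box_c * 3 + 3) 1).any (fun j =>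
           pvCell board i j == num && (i, j) != pos)) then false
    else true

-- ===== PORT B =====
def check_num_alt (board : List (List Int)) (num : Int) (pos : Int × Int) : Bool :=
  let br := PySem.Int.floordiv pos.1 3 * 3
  let bc := PySem.Int.floordiv pos.2 3 * 3
  -- peers = {(pos[0], c) for c in range(len(board[0]))}
  let peers : PySem.Set (Int × Int) :=
    PySem.Set.ofList ((PySem.List.pyRange 0 (PySem.List.pyGetD board 0 []).length 1).map
      (fun c => (pos.1, c)))
  -- peers |= {(r, pos[1]) for r in range(len(board))}
  let peers := PySem.Set.union peers
    ((PySem.List.pyRange 0 board.length 1).map (fun r => (r, pos.2)))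
  -- peers |= {(r, c) for r in range(br, br+3) for c in range(bc, bc+3)}
  let peers := PySem.Set.union peers
    ((PySem.List.pyRange br (br + 3) 1).flatMap (fun r =>
      (PySem.List.pyRange bc (bc + 3) 1).map (fun c => (r, c))))
  -- peers.discard(pos)
  let peers := PySem.Set.discard peers pos
  -- all(board[r][c] != num for r, c in peers)   (order-insensitive over the set)
  peers.all (fun rc => PySem.List.pyGetD (PySem.List.pyGetD board rc.1 []) rc.2 0 != num)

-- ===== PRECONDITION & SPEC =====
-- Pre_ admits every input on which each cell index A scans is a valid (possibly negative,
-- Python-wraparound) index, i.e. A completes all three scans without IndexError; it excludes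
-- inputs with an out-of-range scanned index, where A usually raises IndexError but may
-- return False via an early exit before reaching the invalid index (B, scanning the peer
-- set in one pass, may raise there instead; see claim.json cites).
def Pre_check_num (board : List (List Int)) (num : Int) (pos : Int × Int) : Prop :=
  board ≠ [] ∧
  PySem.Raise.InRange board.length pos.1 ∧
  (board.headD []).length ≤ (PySem.List.pyGetD board pos.1 []).length ∧
  (∀ row ∈ board, PySem.Raise.InRange row.length pos.2) ∧
  (∀ i ∈ PySem.List.pyRange (PySem.Int.floordiv pos.1 3 * 3)
        (PySem.Int.floordiv pos.1 3 * 3 + 3) 1,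
     PySem.Raise.InRange board.length i ∧
     ∀ j ∈ PySem.List.pyRange (PySem.Int.floordiv pos.2 3 * 3)
          (PySem.Int.floordiv pos.2 3 * 3 + 3) 1,
       PySem.Raise.InRange (PySem.List.pyGetD board i []).length j)
instance (board : List (List Int)) (num : Int) (pos : Int × Int) : Decidable (Pre_check_num board num pos) := by unfold Pre_check_num; infer_instance

def pvWitness_check_num : List (List Int) × Int × (Int × Int) :=
  ([[1,0,0],[0,2,0],[0,0,3]], 2, (0, 1))

def Spec_check_num (board : List (List Int)) (num : Int) (pos : Int × Int) (out : Bool) : Prop := out = check_num_alt board num pos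
instance (board : List (List Int)) (num : Int) (pos : Int × Int) (out : Bool) : Decidable (Spec_check_num board num pos out) := by unfold Spec_check_num; infer_instance

-- ===== CLAIM (what is proved, stated in full; the proofs are below) =====
def Claim_equal_check_num : Prop := ∀ (board : List (List Int)) (num : Int) (pos : Int × Int), Dom_check_num board num pos → Pre_check_num board num pos → Spec_check_num board num pos (check_num board num pos)

-- ===== LEMMAS AND PROOFS =====

theorem pv_chain_true_iff (a b c : Bool) :
    (if a then false else if b then false else if c then false else true) = true ↔
      a = false ∧ b = false ∧ c = false := by
  cases a <;> cases b <;> cases c <;> simp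

theorem check_num_eq_alt (board : List (List Int)) (num : Int) (pos : Int × Int) :
    check_num board num pos = check_num_alt board num pos := by
  rw [Bool.eq_iff_iff]
  unfold check_num check_num_alt
  rw [pv_chain_true_iff]
  simp [List.any_eq_false, List.all_eq_true,
    PySem.Set.mem_discard, PySem.Set.mem_union, PySem.Set.mem_ofList,
    List.mem_map, List.mem_flatMap, PySem.List.mem_pyRange_one, pvCell]
  constructor
  · rintro ⟨hr, hc, hb⟩ a b h hne hcell
    rcases h with (⟨⟨h0, hm⟩, rfl⟩ | ⟨⟨h0, hn⟩, rfl⟩) | ⟨⟨h1, h2⟩, h3, h4⟩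
    · exact hne (by rw [hr b h0 hm hcell])
    · exact hne (by rw [hc a h0 hn hcell])
    · exact hne (hb a h1 h2 b h3 h4 hcell)
  · intro hB
    refine ⟨?_, ?_, ?_⟩
    · intro x h0 hm hcell
      by_contra hx
      exact hB pos.1 x (Or.inl (Or.inl ⟨⟨h0, hm⟩, rfl⟩))
        (fun he => hx (congrArg Prod.snd he)) hcell
    · intro x h0 hn hcell
      by_contra hx
      exact hB x pos.2 (Or.inl (Or.inr ⟨⟨h0, hn⟩, rfl⟩))
        (fun he => hx (congrArg Prod.fst he)) hcell
    · intro x h1 h2 y h3 h4 hcell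
      by_contra hx
      exact hB x y (Or.inr ⟨⟨h1, h2⟩, h3, h4⟩) hx hcell

-- ===== VERDICT (by name: the statement is the Claim_ definition above) =====
theorem check_num_spec : Claim_equal_check_num := by
  intro board num pos _ _
  exact check_num_eq_alt board num pos
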